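-- pv_equiv track=rewrite | github.com/prasanna-28/Competitive-Programming | codeforces/2139/E1. Maple and Tree Beauty (Easy Version).py | subset_sum_reachability
-- ===== SOURCE A (Python) =====
-- from collections import deque, defaultdict, Counter
--
-- def subset_sum_reachability(nums, k):
--     mask = (1 << (k + 1)) - 1
--     dp = 1
--     cnt = Counter(nums)
--     for v, c in cnt.items():
--         if v <= 0:
--             continue
--         c = min(c, k // v)
--         t = 1
--         while c > 0:
--             s = min(t, c)
--             dp = dp | ((dp << (v * s)) & mask)
--             c -= s
--             t <<= 1
--     return [bool((dp >> i) & 1) for i in range(k + 1)]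
-- ===== SOURCE B (Python) =====
-- from collections import Counter
--
-- def subset_sum_reachability(nums, k):
--     reachable = [i == 0 for i in range(k + 1)]
--     for v, c in Counter(nums).items():
--         if v <= 0:
--             continue
--         for _ in range(min(c, k // v)):
--             for s in range(k, v - 1, -1):
--                 if reachable[s - v]:
--                     reachable[s] = True
--     return reachable
-- ===== Notes on version B (the rewrite author's own statement) =====
-- stated objective: alternative
-- what changed: Replaces A's big-integer bitmask DP (binary splitting of each count into shifted OR-merges) by a boolean-list knapsack that does one in-place descending sweep per allowed copy of each value; Pre_ excludes k <= -2, where A raises ValueError on the negative shift count in '1 << (k + 1)' and B returns the empty list.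
import Mathlib
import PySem

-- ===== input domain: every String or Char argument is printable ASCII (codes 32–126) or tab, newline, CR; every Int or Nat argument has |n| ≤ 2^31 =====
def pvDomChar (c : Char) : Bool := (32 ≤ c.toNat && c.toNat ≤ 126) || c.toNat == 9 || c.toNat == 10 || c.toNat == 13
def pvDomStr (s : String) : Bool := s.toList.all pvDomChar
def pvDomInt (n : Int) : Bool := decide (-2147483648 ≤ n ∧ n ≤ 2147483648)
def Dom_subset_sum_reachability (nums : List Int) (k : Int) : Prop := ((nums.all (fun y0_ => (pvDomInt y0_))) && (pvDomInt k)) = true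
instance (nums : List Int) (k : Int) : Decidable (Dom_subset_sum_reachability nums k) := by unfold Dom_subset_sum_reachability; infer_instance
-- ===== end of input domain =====

-- B replaces A's big-integer bitmask DP (binary splitting of counts into shifted ORs) by a
-- boolean-list knapsack: one descending in-place sweep per allowed copy of each value (objective: alternative).

-- ===== PORT A =====
-- the 'while c > 0' loop of A; Python's t is always ≥ 1 here, the guard '0 < t' only makes the recursion total
def ssrWhileA (mask : Nat) (v : Int) (c t : Int) (dp : Nat) : Nat :=
  if h : 0 < c ∧ 0 < t then
    ssrWhileA mask v (c - min t c) (t * 2) (dp ||| ((dp <<< (v * min t c).toNat) &&& mask))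
  else dp
termination_by c.toNat
decreasing_by omega

def subset_sum_reachability (nums : List Int) (k : Int) : List Bool :=
  let mask : Nat := (1 <<< (k + 1).toNat) - 1
  let dp : Nat := ((PySem.Dict.counter nums).items).foldl
    (fun dp vc => if vc.1 ≤ 0 then dp
      else ssrWhileA mask vc.1 (min vc.2 (PySem.Int.floordiv k vc.1)) 1 dp) 1
  (PySem.List.pyRange 0 (k + 1) 1).map (fun i => ((dp >>> i.toNat) &&& 1) == 1)

-- ===== PORT B =====
-- one descending 0/1-knapsack sweep: for s in range(k, v-1, -1): if reachable[s-v]: reachable[s] = True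
def ssrSweep (k v : Int) (r : List Bool) : List Bool :=
  (PySem.List.pyRange k (v - 1) (-1)).foldl
    (fun r s => if PySem.List.pyGetD r (s - v) false then PySem.List.pySetD r s true else r) r

def subset_sum_reachability_alt (nums : List Int) (k : Int) : List Bool :=
  ((PySem.Dict.counter nums).items).foldl
    (fun r vc => if vc.1 ≤ 0 then r
      else (PySem.List.pyRange 0 (min vc.2 (PySem.Int.floordiv k vc.1)) 1).foldl
        (fun r _ => ssrSweep k vc.1 r) r)
    ((PySem.List.pyRange 0 (k + 1) 1).map (fun i => i == 0))

-- ===== PRECONDITION & SPEC =====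
-- Pre_ excludes k ≤ -2, where A raises ValueError on '1 << (k + 1)' (negative shift count).
def Pre_subset_sum_reachability (nums : List Int) (k : Int) : Prop := -1 ≤ k
instance (nums : List Int) (k : Int) : Decidable (Pre_subset_sum_reachability nums k) := by
  unfold Pre_subset_sum_reachability; infer_instance
def pvWitness_subset_sum_reachability : List Int × Int := ([1, 2, 2], 4)

def Spec_subset_sum_reachability (nums : List Int) (k : Int) (out : List Bool) : Prop := out = subset_sum_reachability_alt nums k
instance (nums : List Int) (k : Int) (out : List Bool) : Decidable (Spec_subset_sum_reachability nums k out) := by unfold Spec_subset_sum_reachability; infer_instance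

-- ===== CLAIM (what is proved, stated in full; the proofs are below) =====
def Claim_equal_subset_sum_reachability : Prop := ∀ (nums : List Int) (k : Int), Dom_subset_sum_reachability nums k → Pre_subset_sum_reachability nums k → Spec_subset_sum_reachability nums k (subset_sum_reachability nums k)

-- ===== LEMMAS AND PROOFS =====

-- reachability closure: i is reachable from f by adding at most c copies of v (capping is implicit: queried only below k+1)
def ssrE (v c : Nat) (f : Nat → Bool) (i : Nat) : Bool :=
  decide (∃ m, m ≤ c ∧ v * m ≤ i ∧ f (i - v * m) = true)

-- the abstract effect of one Counter item (v, c) on the reachability predicate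
def ssrAbsStep (k : Int) (f : Nat → Bool) (p : Int × Int) : Nat → Bool :=
  if p.1 ≤ 0 then f else ssrE p.1.toNat (min p.2 (PySem.Int.floordiv k p.1)).toNat f

theorem ssrE_zero (v : Nat) (f : Nat → Bool) : ssrE v 0 f = f := by
  funext i; simp [ssrE]

theorem ssrE_merge (v b s : Nat) (hs : s ≤ b + 1) (f : Nat → Bool) (i : Nat) :
    (ssrE v b f i || (decide (v * s ≤ i) && ssrE v b f (i - v * s))) = ssrE v (b + s) f i := by
  simp only [ssrE, ← Bool.decide_and, ← Bool.decide_or, decide_eq_decide]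
  constructor
  · rintro (⟨m, hm, hvm, hf⟩ | ⟨hvs, m, hm, hvm, hf⟩)
    · exact ⟨m, by omega, hvm, hf⟩
    · refine ⟨s + m, by omega, ?_, ?_⟩
      · have h1 : v * (s + m) = v * s + v * m := Nat.mul_add v s m
        have h2 := (Nat.le_sub_iff_add_le hvs).mp hvm
        omega
      · rwa [Nat.sub_sub, ← Nat.mul_add] at hf
  · rintro ⟨m, hm, hvm, hf⟩
    by_cases hmb : m ≤ b
    · exact Or.inl ⟨m, hmb, hvm, hf⟩
    · refine Or.inr ⟨by nlinarith [Nat.mul_le_mul_left v (show s ≤ m by omega)], ⟨m - s, by omega, ?_, ?_⟩⟩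
      · have h1 : v * s + v * (m - s) = v * m := by rw [← Nat.mul_add]; congr 1; omega
        have h2 : v * s ≤ i := le_trans (by omega) hvm
        omega
      · have h1 : v * s + v * (m - s) = v * m := by rw [← Nat.mul_add]; congr 1; omega
        rw [Nat.sub_sub, h1]; exact hf

theorem ssr_bit_step (dp a K i : Nat) : (dp ||| ((dp <<< a) &&& ((1 <<< K) - 1))).testBit i
    = (dp.testBit i || ((decide (a ≤ i) && decide (i < K)) && dp.testBit (i - a))) := by
  simp only [Nat.testBit_or, Nat.testBit_and, Nat.one_shiftLeft, Nat.testBit_shiftLeft,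
    Nat.testBit_two_pow_sub_one]
  by_cases h1 : a ≤ i <;> by_cases h2 : i < K <;> simp [h1, h2]

theorem ssr_testBit_one (i : Nat) : Nat.testBit 1 i = decide (i = 0) := by
  cases i with
  | zero => rfl
  | succ n => simp [Nat.testBit_succ]

theorem ssr_bit_read (dp j : Nat) : (((dp >>> j) &&& 1) == 1) = dp.testBit j := by
  simp [Nat.testBit, Nat.and_one_is_mod, Nat.shiftRight_eq_div_pow]

theorem ssr_foldl_const {α β : Type} (hfun : β → β) (l : List α) (r : β) :
    l.foldl (fun r _ => hfun r) r = hfun^[l.length] r := by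
  induction l generalizing r with
  | nil => rfl
  | cons x xs ih => simp [List.foldl_cons, ih, Function.iterate_succ_apply]

theorem ssrWhileA_bits (K : Nat) (v : Int) (hv : 0 < v) :
    ∀ (n : Nat) (c t : Int) (dp : Nat) (f : Nat → Bool) (b : Nat),
    c.toNat = n → 0 < t → (0 < c → t.toNat ≤ b + 1) →
    (∀ i, dp.testBit i = (decide (i < K) && ssrE v.toNat b f i)) →
    ∀ i, (ssrWhileA ((1 <<< K) - 1) v c t dp).testBit i
        = (decide (i < K) && ssrE v.toNat (b + c.toNat) f i) := by
  intro n
  induction n using Nat.strong_induction_on with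
  | _ n ih =>
    intro c t dp f b hcn ht hbt hdp i
    rw [ssrWhileA]
    by_cases hct : 0 < c ∧ 0 < t
    · simp only [dif_pos hct]
      have hs1 : 1 ≤ min t c := by omega
      have hsb : (min t c).toNat ≤ b + 1 := by have := hbt hct.1; omega
      have hvs : (v * min t c).toNat = v.toNat * (min t c).toNat :=
        Int.toNat_mul (by omega) (by omega)
      have hstep : ∀ j, (dp ||| ((dp <<< (v * min t c).toNat) &&& ((1 <<< K) - 1))).testBit j
          = (decide (j < K) && ssrE v.toNat (b + (min t c).toNat) f j) := by
        intro j
        rw [ssr_bit_step, hvs, hdp j, hdp (j - v.toNat * (min t c).toNat)]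
        by_cases hjK : j < K
        · have hja : j - v.toNat * (min t c).toNat < K := by omega
          simp only [hjK, hja, decide_true, Bool.true_and, Bool.and_true]
          exact ssrE_merge v.toNat b (min t c).toNat hsb f j
        · simp [hjK]
      have hlt : (c - min t c).toNat < n := by omega
      have hres := ih _ hlt (c - min t c) (t * 2) _ f (b + (min t c).toNat) rfl (by omega)
        (by intro h2; omega) hstep i
      have harg : b + (min t c).toNat + (c - min t c).toNat = b + c.toNat := by omega
      rw [harg] at hres
      exact hres
    · simp only [dif_neg hct]
      have hc0 : c.toNat = 0 := by omega
      rw [hdp i, hc0, Nat.add_zero]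

theorem ssrSweep_aux (k v : Int) (hv : 0 < v) (hk : 0 ≤ k) (g h : Nat → Bool)
    (hh : ∀ i, h i = (g i || (decide (v.toNat ≤ i) && g (i - v.toNat)))) :
    ∀ (n : Nat) (a : Int), (a - (v - 1)).toNat = n → v - 1 ≤ a → a ≤ k →
    ∀ (r : List Bool), r.length = (k + 1).toNat →
    (∀ i, i < (k + 1).toNat → r.getD i false = (if a < (i : Int) then h i else g i)) →
    (PySem.List.pyRange a (v - 1) (-1)).foldl
      (fun r s => if PySem.List.pyGetD r (s - v) false then PySem.List.pySetD r s true else r) r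
      = (List.range (k + 1).toNat).map h := by
  intro n
  induction n with
  | zero =>
    intro a han hva hak r hlen hinv
    have : a ≤ v - 1 := by omega
    rw [PySem.List.pyRange_neg_one_eq_nil this]
    simp only [List.foldl_nil]
    apply List.ext_getElem (by simp [hlen])
    intro i h1 h2
    have hiK : i < (k + 1).toNat := by omega
    have := hinv i hiK
    rw [List.getD_eq_getElem r false h1] at this
    simp only [List.getElem_map, List.getElem_range]
    rw [this]
    by_cases hai : a < (i : Int)
    · simp [hai]
    · have : ¬ (v.toNat ≤ i) := by omega
      simp [hai, hh i, this]
  | succ n ihn =>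
    intro a han hva hak r hlen hinv
    have hlt : v - 1 < a := by omega
    rw [PySem.List.pyRange_neg_one_cons hlt]
    simp only [List.foldl_cons]
    have hav0 : (0:Int) ≤ a - v := by omega
    have havK : (a - v).toNat < r.length := by omega
    have hget : PySem.List.pyGetD r (a - v) false = r.getD (a - v).toNat false := by
      rw [PySem.List.pyGetD_eq_getElem r false hav0 (by omega), List.getD_eq_getElem r false havK]
    have hgetv : PySem.List.pyGetD r (a - v) false = g (a - v).toNat := by
      have hcond : ¬ (a < ((a - v).toNat : Int)) := by omega
      rw [hget, hinv (a - v).toNat (by omega), if_neg hcond]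
    have hset : PySem.List.pySetD r a true = r.set a.toNat true :=
      PySem.List.pySetD_of_nonneg r true (by omega)
    set r1 := if PySem.List.pyGetD r (a - v) false then PySem.List.pySetD r a true else r with hr1
    have hlen1 : r1.length = (k + 1).toNat := by
      rw [hr1]; split <;> simp [hset, hlen]
    have hinv1 : ∀ i, i < (k + 1).toNat → r1.getD i false = (if a - 1 < (i : Int) then h i else g i) := by
      intro i hiK
      have hir : i < r.length := by omega
      by_cases hia : i = a.toNat
      · have hvi : v.toNat ≤ i := by omega
        have hsub : i - v.toNat = (a - v).toNat := by omega
        have hcond : a - 1 < (i : Int) := by omega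
        have hia' : a.toNat = i := hia.symm
        rw [hr1, if_pos hcond, hh i, hsub]
        by_cases hb : PySem.List.pyGetD r (a - v) false
        · rw [if_pos hb, hset,
              List.getD_eq_getElem _ false (by simpa [hlen] using hir),
              List.getElem_set, if_pos hia']
          rw [hgetv] at hb
          simp [hvi, hb]
        · rw [if_neg hb]
          rw [hgetv] at hb
          rw [hinv i hiK]
          have hno : ¬ (a < (i : Int)) := by omega
          rw [if_neg hno]
          simp [hvi, hb]
      · have hr1i : r1.getD i false = r.getD i false := by
          rw [hr1]; split
          · rw [hset]
            rw [List.getD_eq_getElem _ false (by simpa [hlen] using hir),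
                List.getD_eq_getElem r false hir]
            rw [List.getElem_set_ne (by omega)]
          · rfl
        rw [hr1i, hinv i hiK]
        have : (a - 1 < (i : Int)) ↔ (a < (i : Int)) := by omega
        simp [this]
    exact ihn (a - 1) (by omega) (by omega) (by omega) r1 hlen1 hinv1

theorem ssrSweep_eq (k v : Int) (hk : -1 ≤ k) (hv : 0 < v) (g : Nat → Bool) :
    ssrSweep k v ((List.range (k + 1).toNat).map g)
      = (List.range (k + 1).toNat).map (fun i => g i || (decide (v.toNat ≤ i) && g (i - v.toNat))) := by
  unfold ssrSweep
  by_cases hvk : v - 1 ≤ k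
  · apply ssrSweep_aux k v hv (by omega) g _ (fun i => rfl) ((k - (v - 1)).toNat) k rfl hvk le_rfl
    · simp
    · intro i hiK
      have hno : ¬ (k < (i : Int)) := by omega
      rw [if_neg hno, List.getD_eq_getElem _ false (by simpa using hiK)]
      simp
  · rw [PySem.List.pyRange_neg_one_eq_nil (by omega)]
    simp only [List.foldl_nil]
    apply List.map_congr_left
    intro i hi
    have : ¬ (v.toNat ≤ i) := by simp [List.mem_range] at hi; omega
    simp [this]

theorem ssrCopies (k v : Int) (hk : -1 ≤ k) (hv : 0 < v) :
    ∀ (n : Nat) (f : Nat → Bool),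
    (ssrSweep k v)^[n] ((List.range (k + 1).toNat).map f)
      = (List.range (k + 1).toNat).map (ssrE v.toNat n f) := by
  intro n
  induction n with
  | zero => intro f; simp [ssrE_zero]
  | succ n ihn =>
    intro f
    rw [Function.iterate_succ_apply', ihn f, ssrSweep_eq k v hk hv]
    apply List.map_congr_left
    intro i _
    have hm := ssrE_merge v.toNat n 1 (by omega) f i
    rw [Nat.mul_one] at hm
    exact hm

theorem ssrB_fold (k : Int) (hk : -1 ≤ k) :
    ∀ (l : List (Int × Int)) (f : Nat → Bool),
    l.foldl (fun r vc => if vc.1 ≤ 0 then r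
        else (PySem.List.pyRange 0 (min vc.2 (PySem.Int.floordiv k vc.1)) 1).foldl
          (fun r _ => ssrSweep k vc.1 r) r)
      ((List.range (k + 1).toNat).map f)
      = (List.range (k + 1).toNat).map (l.foldl (ssrAbsStep k) f) := by
  intro l
  induction l with
  | nil => intro f; rfl
  | cons p l ih =>
    intro f
    simp only [List.foldl_cons]
    by_cases hp : p.1 ≤ 0
    · rw [if_pos hp]
      rw [ih f]
      simp only [ssrAbsStep, if_pos hp]
    · rw [if_neg hp]
      rw [ssr_foldl_const (ssrSweep k p.1)]
      rw [PySem.List.length_pyRange_one]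
      have hsz : (min p.2 (PySem.Int.floordiv k p.1) - 0).toNat
          = (min p.2 (PySem.Int.floordiv k p.1)).toNat := by omega
      rw [hsz, ssrCopies k p.1 hk (by omega), ih]
      simp only [ssrAbsStep, if_neg hp]

theorem ssrA_fold (k : Int) :
    ∀ (l : List (Int × Int)) (dp : Nat) (f : Nat → Bool),
    (∀ i, dp.testBit i = (decide (i < (k + 1).toNat) && f i)) →
    ∀ i, (l.foldl (fun (dp : Nat) (vc : Int × Int) => if vc.1 ≤ 0 then dp
        else ssrWhileA (((1 <<< (k + 1).toNat) - 1 : Nat)) vc.1 (min vc.2 (PySem.Int.floordiv k vc.1)) 1 dp) dp).testBit i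
      = (decide (i < (k + 1).toNat) && (l.foldl (ssrAbsStep k) f) i) := by
  intro l
  induction l with
  | nil => intro dp f hdp i; exact hdp i
  | cons p l ih =>
    intro dp f hdp i
    simp only [List.foldl_cons]
    by_cases hp : p.1 ≤ 0
    · rw [if_pos hp]
      have := ih dp f hdp i
      rw [this]
      simp only [ssrAbsStep, if_pos hp]
    · rw [if_neg hp]
      apply ih
      intro j
      have hw := ssrWhileA_bits ((k + 1).toNat) p.1 (by omega)
        (min p.2 (PySem.Int.floordiv k p.1)).toNat
        (min p.2 (PySem.Int.floordiv k p.1)) 1 dp f 0 rfl (by omega) (by intro _; omega)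
        (by intro j; rw [hdp j, ssrE_zero]) j
      rw [hw, Nat.zero_add]
      simp only [ssrAbsStep, if_neg hp]

-- ===== VERDICT (by name: the statement is the Claim_ definition above) =====
theorem subset_sum_reachability_spec : Claim_equal_subset_sum_reachability := by
  unfold Claim_equal_subset_sum_reachability
  intro nums k _ hpre
  unfold Pre_subset_sum_reachability at hpre
  unfold Spec_subset_sum_reachability subset_sum_reachability subset_sum_reachability_alt
  have hinit : (PySem.List.pyRange 0 (k + 1) 1).map (fun i => i == 0)
      = (List.range (k + 1).toNat).map (fun i => decide (i = 0)) := by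
    rw [PySem.List.pyRange_one, List.map_map,
        show k + 1 - 0 = k + 1 from by ring]
    apply List.map_congr_left
    intro i _
    by_cases h : i = 0
    · simp [h]
    · simp [h, Int.natCast_eq_zero]
  rw [hinit, ssrB_fold k hpre]
  by_cases hk0 : 0 ≤ k
  · rw [PySem.List.pyRange_one, List.map_map,
        show k + 1 - 0 = k + 1 from by ring]
    apply List.map_congr_left
    intro i hi
    have hiK : i < (k + 1).toNat := by
      simp [List.mem_range] at hi; omega
    have h0i : ((0 : Int) + (i : Int)).toNat = i := by omega
    simp only [Function.comp, h0i]
    rw [ssr_bit_read]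
    rw [ssrA_fold k ((PySem.Dict.counter nums).items) 1 (fun j => decide (j = 0))
      (by intro j
          rw [ssr_testBit_one]
          by_cases hj : j = 0
          · subst hj; simp; omega
          · simp [hj]) i]
    simp [hiK]
  · have hK0 : (k + 1).toNat = 0 := by omega
    rw [hK0]
    rw [PySem.List.pyRange_one_eq_nil (by omega)]
    simp
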